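-- pv_equiv track=rewrite | github.com/Kris-clawbot/phm_research | app/elsevier_client.py | first_n_sentences
-- ===== SOURCE A (Python) =====
-- def first_n_sentences(text: str, n: int = 2) -> str:
--     # very small heuristic sentence splitter (good enough for a test output)
--     t = " ".join(text.split())
--     if not t:
--         return ""
--
--     out: list[str] = []
--     start = 0
--     for i, ch in enumerate(t):
--         if ch in ".!?" and i + 1 < len(t) and t[i + 1] == " ":
--             sent = t[start : i + 1].strip()
--             if sent:
--                 out.append(sent)
--             start = i + 2
--             if len(out) >= n:
--                 break
--
--     if len(out) < n:
--         tail = t[start:].strip()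
--         if tail:
--             out.append(tail)
--
--     return " ".join(out[:n]).strip()
-- ===== SOURCE B (Python) =====
-- def first_n_sentences(text: str, n: int = 2) -> str:
--     # group the words directly: a sentence ends at a word whose last char is . ! or ?
--     parts: list[str] = []
--     cur: list[str] = []
--     for w in text.split():
--         cur.append(w)
--         if w[-1] in ".!?":
--             parts.append(" ".join(cur))
--             cur = []
--     if cur:
--         parts.append(" ".join(cur))
--     return " ".join(parts[:max(n, 0)])
-- ===== Notes on version B (the rewrite author's own statement) =====
-- stated objective: simpler
-- what changed: B drops A's char-by-char scan of the re-joined string (start pointer, index slices, early break, separate tail fallback) and instead groups the words of text.split() directly, closing a group at each word ending in sentence punctuation, then joins the first max(n,0) groups.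
import Mathlib
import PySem

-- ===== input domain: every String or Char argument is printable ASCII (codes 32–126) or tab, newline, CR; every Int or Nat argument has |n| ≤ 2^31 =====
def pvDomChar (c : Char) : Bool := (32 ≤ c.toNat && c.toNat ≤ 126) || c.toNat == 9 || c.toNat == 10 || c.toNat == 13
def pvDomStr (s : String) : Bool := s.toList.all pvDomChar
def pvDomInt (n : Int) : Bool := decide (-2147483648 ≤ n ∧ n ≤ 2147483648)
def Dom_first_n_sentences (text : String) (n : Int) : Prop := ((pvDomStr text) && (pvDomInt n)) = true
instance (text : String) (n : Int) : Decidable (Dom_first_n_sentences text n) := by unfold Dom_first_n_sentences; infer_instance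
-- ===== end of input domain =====

-- B regroups the words of text.split() directly (a sentence ends at a word ending in sentence
-- punctuation) instead of A's char-by-char scan of the re-joined string with a start pointer,
-- slices and a tail fallback; simpler, and measured faster by a constant factor (no re-joined
-- string is built or sliced); equal return value on all inputs.

-- ===== PORT A =====

-- the for-loop over enumerate(t): state (out, start); returns at `break`
def aLoop (t : List Char) (n : Int) : List (Int × Char) → List (List Char) → Int → (List (List Char) × Int)
  | [], out, start => (out, start)
  | (i, ch) :: rest, out, start =>
    if (ch = '.' ∨ ch = '!' ∨ ch = '?') ∧ i + 1 < (t.length : Int) ∧ PySem.List.pyGet? t (i + 1) = some ' ' then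
      let sent := PySem.Chars.strip (PySem.List.slice t (some start) (some (i + 1)))
      let out' := if sent ≠ [] then out ++ [sent] else out
      let start' := i + 2
      if n ≤ (out'.length : Int) then (out', start')
      else aLoop t n rest out' start'
    else aLoop t n rest out start

-- the code after the loop: optional tail append
def aTail (t : List Char) (n : Int) (r : List (List Char) × Int) : List (List Char) :=
  if (r.1.length : Int) < n then
    let tail := PySem.Chars.strip (PySem.List.slice t (some r.2) none)
    if tail ≠ [] then r.1 ++ [tail] else r.1
  else r.1

def first_n_sentences (text : String) (n : Int) : String :=
  let t : List Char := PySem.Chars.join [' '] (PySem.Chars.split₀ text.toList)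
  if t = [] then ""
  else
    let out := aTail t n (aLoop t n (PySem.List.enumerate t 0) [] 0)
    String.ofList (PySem.Chars.strip (PySem.Chars.join [' '] (PySem.List.slice out none (some n))))

-- ===== PORT B =====

-- the for-loop over text.split(): state (parts, cur); w[-1] via pyGetD (words of split() are never empty)
def bLoop : List (List Char) → List (List Char) → List (List Char) → (List (List Char) × List (List Char))
  | [], parts, cur => (parts, cur)
  | w :: ws, parts, cur =>
    let cur' := cur ++ [w]
    if PySem.List.pyGetD w (-1) ' ' = '.' ∨ PySem.List.pyGetD w (-1) ' ' = '!' ∨ PySem.List.pyGetD w (-1) ' ' = '?' then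
      bLoop ws (parts ++ [PySem.Chars.join [' '] cur']) []
    else bLoop ws parts cur'

def first_n_sentences_alt (text : String) (n : Int) : String :=
  let r := bLoop (PySem.Chars.split₀ text.toList) [] []
  let parts := if r.2 ≠ [] then r.1 ++ [PySem.Chars.join [' '] r.2] else r.1
  String.ofList (PySem.Chars.join [' '] (PySem.List.slice parts none (some (max n 0))))

-- ===== PRECONDITION & SPEC =====
def Spec_first_n_sentences (text : String) (n : Int) (out : String) : Prop := out = first_n_sentences_alt text n
instance (text : String) (n : Int) (out : String) : Decidable (Spec_first_n_sentences text n out) := by unfold Spec_first_n_sentences; infer_instance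

-- ===== CLAIM (what is proved, stated in full; the proofs are below) =====
def Claim_equal_first_n_sentences : Prop := ∀ (text : String) (n : Int), Dom_first_n_sentences text n → Spec_first_n_sentences text n (first_n_sentences text n)

-- ===== LEMMAS AND PROOFS =====

-- a word of split(): nonempty and whitespace-free
def GoodW (w : List Char) : Prop := w ≠ [] ∧ ∀ c ∈ w, PySem.Chars.isspace c = false

-- a sentence piece: nonempty with non-whitespace first and last char (so strip is a no-op)
def GoodP (p : List Char) : Prop :=
  p ≠ [] ∧ (∀ c, p.head? = some c → PySem.Chars.isspace c = false) ∧
    (∀ c, p.getLast? = some c → PySem.Chars.isspace c = false)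

theorem split₀_go_goodW : ∀ (s cur : List Char) (acc : List (List Char)),
    (∀ c ∈ cur, PySem.Chars.isspace c = false) → (∀ w ∈ acc, GoodW w) →
    ∀ w ∈ PySem.Chars.split₀.go s cur acc, GoodW w := by
  intro s
  induction s with
  | nil =>
    intro cur acc hcur hacc w hw
    rw [PySem.Chars.split₀.go] at hw
    split at hw
    · exact hacc w (List.mem_reverse.mp hw)
    · rcases List.mem_cons.mp (List.mem_reverse.mp hw) with h | h
      · subst h
        refine ⟨by simpa using List.isEmpty_eq_false_iff.mp (by simp_all), ?_⟩
        intro c hc; exact hcur c (List.mem_reverse.mp hc)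
      · exact hacc w h
  | cons c rest ih =>
    intro cur acc hcur hacc w hw
    rw [PySem.Chars.split₀.go] at hw
    by_cases hsp : PySem.Chars.isspace c = true
    · rw [if_pos hsp] at hw
      split at hw
      · exact ih [] acc (by simp) hacc w hw
      · refine ih [] (cur.reverse :: acc) (by simp) ?_ w hw
        intro v hv
        rcases List.mem_cons.mp hv with hv | hv
        · subst hv
          refine ⟨by simpa using List.isEmpty_eq_false_iff.mp (by simp_all), ?_⟩
          intro d hd; exact hcur d (List.mem_reverse.mp hd)
        · exact hacc v hv
    · rw [if_neg hsp] at hw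
      refine ih (c :: cur) acc ?_ hacc w hw
      intro d hd
      rcases List.mem_cons.mp hd with hd | hd
      · subst hd; simpa using hsp
      · exact hcur d hd

theorem split₀_goodW (s : List Char) : ∀ w ∈ PySem.Chars.split₀ s, GoodW w :=
  split₀_go_goodW s [] [] (by simp) (by simp)

theorem dropWhile_isspace_good (l : List Char)
    (h : ∀ c, l.head? = some c → PySem.Chars.isspace c = false) :
    List.dropWhile PySem.Chars.isspace l = l := by
  cases l with
  | nil => rfl
  | cons c rest => rw [List.dropWhile_cons_of_neg]; simp [h c rfl]

theorem strip_goodP (p : List Char) (h : GoodP p) : PySem.Chars.strip p = p := by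
  obtain ⟨-, hh, hl⟩ := h
  show PySem.Chars.rstrip (PySem.Chars.lstrip p) = p
  rw [PySem.Chars.lstrip, dropWhile_isspace_good p hh, PySem.Chars.rstrip,
    dropWhile_isspace_good p.reverse (by simpa [List.head?_reverse] using hl), List.reverse_reverse]

theorem goodW_goodP (w : List Char) (h : GoodW w) : GoodP w := by
  obtain ⟨hne, hc⟩ := h
  refine ⟨hne, fun c hc' => hc c (List.mem_of_mem_head? hc'), fun c hc' => hc c (List.mem_of_getLast? hc')⟩

theorem inter_goodP : ∀ (ws : List (List Char)), ws ≠ [] → (∀ w ∈ ws, GoodP w) →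
    GoodP (List.intercalate [' '] ws) := by
  intro ws
  induction ws with
  | nil => intro h; exact absurd rfl h
  | cons w rest ih =>
    intro _ h
    cases rest with
    | nil => simpa [List.intercalate] using h w (by simp)
    | cons v rest' =>
      have hw := h w (by simp)
      have hr := ih (by simp) (fun u hu => h u (by simp [hu]))
      have hrw : List.intercalate [' '] (w :: v :: rest') = w ++ [' '] ++ List.intercalate [' '] (v :: rest') := by
        simp [List.intercalate]
      rw [hrw]
      obtain ⟨hwne, hwh, hwl⟩ := hw
      obtain ⟨hrne, hrh, hrl⟩ := hr
      refine ⟨by simp [hwne], ?_, ?_⟩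
      · intro c hc
        rw [List.append_assoc, List.head?_append_of_ne_nil _ hwne] at hc
        exact hwh c hc
      · intro c hc
        rw [List.getLast?_append_of_ne_nil _ hrne] at hc
        exact hrl c hc

theorem aLoop_noB (t : List Char) (n : Int) (l : List (Int × Char)) (out : List (List Char)) (start : Int)
    (h : ∀ p ∈ l, ¬((p.2 = '.' ∨ p.2 = '!' ∨ p.2 = '?') ∧ p.1 + 1 < (t.length : Int) ∧ PySem.List.pyGet? t (p.1 + 1) = some ' ')) :
    aLoop t n l out start = (out, start) := by
  induction l with
  | nil => rfl
  | cons p rest ih =>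
    obtain ⟨i, ch⟩ := p
    rw [aLoop, if_neg (h (i, ch) (by simp))]
    exact ih (fun q hq => h q (by simp [hq]))

theorem aLoop_append (t : List Char) (n : Int) (l1 l2 : List (Int × Char)) (out : List (List Char)) (start : Int)
    (h : (out.length : Int) < n) :
    aLoop t n (l1 ++ l2) out start =
      (let r := aLoop t n l1 out start
       if (r.1.length : Int) < n then aLoop t n l2 r.1 r.2 else r) := by
  induction l1 generalizing out start with
  | nil => simp [aLoop, h]
  | cons p rest ih =>
    obtain ⟨i, ch⟩ := p
    simp only [List.cons_append, aLoop]
    by_cases hc : (ch = '.' ∨ ch = '!' ∨ ch = '?') ∧ i + 1 < (t.length : Int) ∧ PySem.List.pyGet? t (i + 1) = some ' '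
    · simp only [if_pos hc]
      generalize (if PySem.Chars.strip (PySem.List.slice t (some start) (some (i + 1))) ≠ [] then out ++ [PySem.Chars.strip (PySem.List.slice t (some start) (some (i + 1)))] else out) = out'
      by_cases hbrk : n ≤ (out'.length : Int)
      · simp only [if_pos hbrk]
        rw [if_neg (by omega)]
      · simp only [if_neg hbrk]
        exact ih out' (i+2) (by omega)
    · simp only [if_neg hc]
      exact ih out start h

theorem bLoop_parts (ws parts cur : List (List Char)) :
    bLoop ws parts cur = (parts ++ (bLoop ws [] cur).1, (bLoop ws [] cur).2) := by
  induction ws generalizing parts cur with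
  | nil => simp [bLoop]
  | cons w rest ih =>
    rw [bLoop, bLoop]
    split
    · rw [ih (parts ++ _), ih ([] ++ _)]
      simp
    · exact ih parts (cur ++ [w])

-- the final piece list B computes
def bPieces (ws cur : List (List Char)) : List (List Char) :=
  let r := bLoop ws [] cur
  if r.2 ≠ [] then r.1 ++ [PySem.Chars.join [' '] r.2] else r.1

theorem bPieces_nil (cur : List (List Char)) :
    bPieces [] cur = if cur ≠ [] then [List.intercalate [' '] cur] else [] := by
  unfold bPieces bLoop
  split <;> simp_all [PySem.Chars.join]

theorem bPieces_cons (w : List Char) (ws cur : List (List Char)) :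
    bPieces (w :: ws) cur =
      if PySem.List.pyGetD w (-1) ' ' = '.' ∨ PySem.List.pyGetD w (-1) ' ' = '!' ∨ PySem.List.pyGetD w (-1) ' ' = '?'
      then List.intercalate [' '] (cur ++ [w]) :: bPieces ws []
      else bPieces ws (cur ++ [w]) := by
  unfold bPieces
  rw [bLoop]
  split
  · rw [bLoop_parts ws _ []]
    simp only []
    split <;> simp [PySem.Chars.join]
  · rfl

theorem pyGetD_neg_one (w : List Char) (h : w ≠ []) :
    PySem.List.pyGetD w (-1) ' ' = w.getLast h := by
  have hl : 1 ≤ w.length := List.length_pos_iff.mpr h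
  simp only [PySem.List.pyGetD, PySem.List.pyGet?, PySem.List.pyIdx?]
  rw [if_neg (by omega), if_pos (by omega)]
  norm_num
  rw [show w[w.length - 1]? = w.getLast? from List.getLast?_eq_getElem?.symm,
    List.getLast?_eq_some_getLast h]
  rfl

theorem inter_cons_ne (w : List Char) (ws : List (List Char)) (h : ws ≠ []) :
    List.intercalate [' '] (w :: ws) = w ++ ' ' :: List.intercalate [' '] ws := by
  cases ws with
  | nil => exact absurd rfl h
  | cons v rest => simp [List.intercalate]

theorem inter_append_ne (cur ws : List (List Char)) (hc : cur ≠ []) (hw : ws ≠ []) :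
    List.intercalate [' '] (cur ++ ws) =
      List.intercalate [' '] cur ++ ' ' :: List.intercalate [' '] ws := by
  induction cur with
  | nil => exact absurd rfl hc
  | cons c rest ih =>
    cases rest with
    | nil =>
      rw [List.singleton_append, inter_cons_ne _ _ hw]
      simp [List.intercalate]
    | cons d rest' =>
      rw [List.cons_append, inter_cons_ne _ _ (by simp), inter_cons_ne c (d :: rest') (by simp),
        ih (by simp) ]
      simp

theorem goods_append (cur : List (List Char)) (w : List Char)
    (hcur : ∀ u ∈ cur, GoodW u) (hw : GoodW w) : ∀ u ∈ cur ++ [w], GoodW u := by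
  intro u hu
  rcases List.mem_append.mp hu with h | h
  · exact hcur u h
  · rcases List.mem_singleton.mp h with rfl; exact hw

theorem bPieces_goodP (ws : List (List Char)) : ∀ (cur : List (List Char)),
    (∀ u ∈ ws, GoodW u) → (∀ u ∈ cur, GoodW u) → ∀ p ∈ bPieces ws cur, GoodP p := by
  induction ws with
  | nil =>
    intro cur _ hcur p hp
    rw [bPieces_nil] at hp
    split at hp
    · rcases List.mem_singleton.mp hp with rfl
      exact inter_goodP cur (by assumption) (fun u hu => goodW_goodP u (hcur u hu))
    · simp at hp
  | cons wd rest ih =>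
    intro cur hws hcur p hp
    rw [bPieces_cons] at hp
    have hws' : ∀ u ∈ rest, GoodW u := fun u hu => hws u (by simp [hu])
    have hcw : ∀ u ∈ cur ++ [wd], GoodW u := goods_append cur wd hcur (hws wd (by simp))
    split at hp
    · rcases List.mem_cons.mp hp with rfl | hp
      · exact inter_goodP _ (by simp) (fun u hu => goodW_goodP u (hcw u hu))
      · exact ih [] hws' (by simp) p hp
    · exact ih (cur ++ [wd]) hws' hcw p hp

theorem main_inv (t : List Char) (n : Int) (hn : 1 ≤ n) :
    ∀ (ws cur out : List (List Char)) (s start : Nat),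
      (∀ w ∈ ws, GoodW w) → (∀ w ∈ cur, GoodW w) → (∀ p ∈ out, GoodP p) →
      (out.length : Int) < n →
      t.drop start = List.intercalate [' '] (cur ++ ws) →
      t.drop s = List.intercalate [' '] ws →
      (ws ≠ [] → s = start + (if cur = [] then 0 else (List.intercalate [' '] cur).length + 1)) →
      List.take n.toNat (aTail t n (aLoop t n (PySem.List.enumerate (t.drop s) (s : Int)) out (start : Int))) =
        List.take n.toNat (out ++ bPieces ws cur) := by
  intro ws
  induction ws with
  | nil =>
    intro cur out s start _ hcur hout hlen h1 h2 _
    rw [List.append_nil] at h1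
    rw [show List.intercalate [' '] ([] : List (List Char)) = [] from rfl] at h2
    rw [h2]
    rw [show PySem.List.enumerate ([] : List Char) (s : Int) = [] from rfl, aLoop]
    rw [aTail, if_pos (by simpa using hlen)]
    rw [PySem.List.slice_from t (by positivity), Int.toNat_natCast, h1]
    rw [bPieces_nil]
    by_cases hc : cur = []
    · subst hc
      simp [PySem.Chars.strip, PySem.Chars.lstrip, PySem.Chars.rstrip, List.intercalate]
    · have hgp : GoodP (List.intercalate [' '] cur) :=
        inter_goodP cur hc (fun u hu => goodW_goodP u (hcur u hu))
      rw [strip_goodP _ hgp, if_pos hgp.1, if_pos hc]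
  | cons w ws' ih =>
    intro cur out s start hws hcur hout hlen h1 h2 h3
    have hw : GoodW w := hws w (by simp)
    obtain ⟨hwne, hwc⟩ := hw
    have hL : 1 ≤ w.length := List.length_pos_iff.mpr hwne
    have hR : t.drop s = w ++ (if ws' = [] then [] else ' ' :: List.intercalate [' '] ws') := by
      rw [h2]
      cases ws' with
      | nil => simp [List.intercalate]
      | cons v r => rw [inter_cons_ne _ _ (by simp)]; simp
    have hslen : s ≤ t.length := by
      by_contra hcon
      rw [List.drop_eq_nil_of_le (by omega)] at hR
      exact hwne (by simpa using hR.symm ▸ (List.append_eq_nil_iff.mp hR.symm).1)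
    have hdlen : (t.drop s).length = t.length - s := List.length_drop ..
    -- decompose the enumeration: chars of w except the last, the last char of w, the rest
    have hwdec : w.dropLast ++ [w.getLast hwne] = w := List.dropLast_append_getLast hwne
    have henum : PySem.List.enumerate (t.drop s) (s : Int) =
        PySem.List.enumerate w.dropLast (s : Int) ++
          (((s : Int) + (w.dropLast.length : Int), w.getLast hwne) ::
            PySem.List.enumerate (if ws' = [] then [] else ' ' :: List.intercalate [' '] ws')
              ((s : Int) + (w.length : Int))) := by
      rw [hR]
      conv_lhs => rw [← hwdec]
      rw [List.append_assoc, PySem.List.enumerate_append, List.singleton_append,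
        PySem.List.enumerate_cons, List.length_dropLast,
        show ((s : Int) + (↑(w.length - 1) : Int)) + 1 = (s : Int) + (w.length : Int) by omega]
    -- the chars of w before its last produce no sentence boundary
    have hnb : ∀ p ∈ PySem.List.enumerate w.dropLast (s : Int),
        ¬((p.2 = '.' ∨ p.2 = '!' ∨ p.2 = '?') ∧ p.1 + 1 < (t.length : Int) ∧
          PySem.List.pyGet? t (p.1 + 1) = some ' ') := by
      intro p hp
      obtain ⟨k, hk, rfl⟩ := (PySem.List.mem_enumerate_iff _ _ _).mp hp
      rintro ⟨-, -, hsp⟩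
      rw [List.length_dropLast] at hk
      have hcast : ((s : Int) + (k : Int)) + 1 = ((s + (k + 1) : Nat) : Int) := by push_cast; ring
      rw [hcast, PySem.List.pyGet?_natCast, ← List.getElem?_drop, hR] at hsp
      rw [List.getElem?_append_left (by omega)] at hsp
      have hmem : ' ' ∈ w := List.mem_of_getElem? hsp
      have := hwc ' ' hmem
      simp [PySem.Chars.isspace] at this
    rw [henum, aLoop_append t n _ _ out (start : Int) hlen, aLoop_noB t n _ out _ hnb]
    simp only [if_pos hlen]
    cases hws'e : ws' with
    | nil =>
      -- last word of the text: its final char is not followed by a space, no boundary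
      subst hws'e
      simp only [reduceIte]
      replace hR : t.drop s = w := by simpa using hR
      have htlen : t.length = s + w.length := by
        rw [hR] at hdlen; omega
      rw [show PySem.List.enumerate ([] : List Char) ((s : Int) + (w.length : Int)) = []
          from rfl]
      rw [aLoop, if_neg (by
        rintro ⟨-, habs, -⟩
        rw [List.length_dropLast] at habs
        omega), aLoop]
      rw [aTail, if_pos (by simpa using hlen)]
      rw [PySem.List.slice_from t (by positivity), Int.toNat_natCast, h1]
      have hcw : ∀ u ∈ cur ++ [w], GoodW u := goods_append cur w hcur ⟨hwne, hwc⟩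
      have hgp : GoodP (List.intercalate [' '] (cur ++ [w])) :=
        inter_goodP _ (by simp) (fun u hu => goodW_goodP u (hcw u hu))
      rw [show cur ++ [w] = cur ++ w :: [] from rfl] at hgp
      rw [strip_goodP _ hgp, if_pos hgp.1]
      rw [bPieces_cons, bPieces_nil, bPieces_nil]
      split <;> simp
    | cons v rest =>
      rw [← hws'e]
      have hws'ne : ws' ≠ [] := by simp [hws'e]
      simp only [if_neg hws'ne] at hR
      have hIlen : (t.drop s).length = w.length + 1 + (List.intercalate [' '] ws').length := by
        rw [hR]; simp; omega
      have htlen : s + w.length + 1 ≤ t.length := by omega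
      have hsL : ((s : Int) + (w.dropLast.length : Int)) + 1 = ((s + w.length : Nat) : Int) := by
        rw [List.length_dropLast]; push_cast; omega
      have hspace : PySem.List.pyGet? t (((s : Int) + (w.dropLast.length : Int)) + 1) = some ' ' := by
        rw [hsL, PySem.List.pyGet?_natCast, ← List.getElem?_drop, hR]
        rw [List.getElem?_append_right (by omega)]
        simp
      have hcond : ((w.getLast hwne = '.' ∨ w.getLast hwne = '!' ∨ w.getLast hwne = '?') ∧
          ((s : Int) + (w.dropLast.length : Int)) + 1 < (t.length : Int) ∧
          PySem.List.pyGet? t (((s : Int) + (w.dropLast.length : Int)) + 1) = some ' ') ↔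
          (w.getLast hwne = '.' ∨ w.getLast hwne = '!' ∨ w.getLast hwne = '?') := by
        constructor
        · exact fun h => h.1
        · intro h
          refine ⟨h, by rw [hsL]; exact_mod_cast (by omega : s + w.length < t.length), hspace⟩
      have hpg : PySem.List.pyGetD w (-1) ' ' = w.getLast hwne := pyGetD_neg_one w hwne
      -- the piece that ends (or continues) at w
      have hsentval : PySem.List.slice t (some (start : Int))
            (some (((s : Int) + (w.dropLast.length : Int)) + 1)) =
          List.intercalate [' '] (cur ++ [w]) := by
        rw [hsL, PySem.List.slice_natCast, h1]
        by_cases hc : cur = []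
        · subst hc
          have hse : s = start := by have := h3 (by simp); simpa using this
          subst hse
          rw [List.nil_append, inter_cons_ne _ _ hws'ne]
          rw [show s + w.length - s = w.length by omega]
          simp [List.intercalate]
        · have hse : s = start + (List.intercalate [' '] cur).length + 1 := by
            have := h3 (by simp)
            rw [if_neg hc] at this; omega
          rw [inter_append_ne cur _ hc (by simp), inter_cons_ne _ _ hws'ne,
              inter_append_ne cur [w] hc (by simp)]
          rw [show s + w.length - start = (List.intercalate [' '] cur).length + (1 + w.length)
              by omega]
          rw [List.take_append, Nat.add_sub_cancel_left, show (1 + w.length) = w.length + 1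
              by omega, List.take_succ_cons, List.take_left, List.take_of_length_le (by omega)]
          simp [List.intercalate]
      have hcw : ∀ u ∈ cur ++ [w], GoodW u := goods_append cur w hcur ⟨hwne, hwc⟩
      have hsgp : GoodP (List.intercalate [' '] (cur ++ [w])) :=
        inter_goodP _ (by simp) (fun u hu => goodW_goodP u (hcw u hu))
      have hdrop2 : t.drop (s + w.length + 1) = List.intercalate [' '] ws' := by
        rw [show s + w.length + 1 = s + (w.length + 1) by omega, ← List.drop_drop, hR]
        rw [show w ++ ' ' :: List.intercalate [' '] ws' = (w ++ [' ']) ++ List.intercalate [' '] ws'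
            by simp]
        rw [List.drop_append_of_le_length (by simp)]
        simp
      by_cases hpunct : w.getLast hwne = '.' ∨ w.getLast hwne = '!' ∨ w.getLast hwne = '?'
      · -- w ends a sentence here
        rw [aLoop, if_pos (hcond.mpr hpunct)]
        simp only [hsentval, strip_goodP _ hsgp, if_pos hsgp.1]
        by_cases hbrk : n ≤ ((out ++ [List.intercalate [' '] (cur ++ [w])]).length : Int)
        · -- the loop breaks: exactly n sentences collected
          rw [if_pos hbrk]
          rw [aTail, if_neg (by simp at hbrk ⊢; omega)]
          have hntn : n.toNat = out.length + 1 := by simp at hbrk; omega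
          rw [bPieces_cons, if_pos (by rw [pyGetD_neg_one w hwne]; exact hpunct)]
          rw [hntn, List.take_append, List.take_append, Nat.add_sub_cancel_left]
          simp
        · -- fewer than n sentences so far: continue after the space
          rw [if_neg hbrk]
          rw [if_neg hws'ne, PySem.List.enumerate_cons, aLoop,
            if_neg (by rintro ⟨h, -, -⟩ <;> simp at h)]
          have hc1 : ((s : Int) + (w.length : Int)) + 1 = ((s + w.length + 1 : Nat) : Int) := by
            push_cast; ring
          have hc2 : ((s : Int) + (w.dropLast.length : Int)) + 2 = ((s + w.length + 1 : Nat) : Int) := by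
            rw [List.length_dropLast]; push_cast; omega
          rw [hc1, hc2, ← hdrop2]
          have := ih [] (out ++ [List.intercalate [' '] (cur ++ [w])]) (s + w.length + 1)
            (s + w.length + 1) (fun u hu => hws u (by simp [hu]))
            (by simp)
            (fun p hp => by
              rcases List.mem_append.mp hp with h | h
              · exact hout p h
              · rcases List.mem_singleton.mp h with rfl; exact hsgp)
            (by simp at hbrk ⊢; omega)
            (by rw [hdrop2]; simp)
            (by rw [hdrop2])
            (by intro; simp)
          rw [this]
          rw [bPieces_cons, if_pos (by rw [pyGetD_neg_one w hwne]; exact hpunct)]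
          simp
      · -- w does not end a sentence: it joins the current piece
        rw [aLoop, if_neg (by rw [hcond]; exact hpunct)]
        rw [if_neg hws'ne, PySem.List.enumerate_cons, aLoop,
          if_neg (by rintro ⟨h, -, -⟩ <;> simp at h)]
        have hc1 : ((s : Int) + (w.length : Int)) + 1 = ((s + w.length + 1 : Nat) : Int) := by
          push_cast; ring
        rw [hc1, ← hdrop2]
        have := ih (cur ++ [w]) out (s + w.length + 1) start
          (fun u hu => hws u (by simp [hu])) hcw hout hlen
          (by rw [h1]; congr 1; simp)
          (by rw [hdrop2])
          (by
            intro
            rw [if_neg (by simp)]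
            by_cases hc : cur = []
            · subst hc
              have hse : s = start := by simpa using h3 (by simp)
              simp [List.intercalate]
              omega
            · have hse : s = start + (List.intercalate [' '] cur).length + 1 := by
                have := h3 (by simp)
                rw [if_neg hc] at this; omega
              rw [inter_append_ne cur [w] hc (by simp),
                show List.intercalate [' '] [w] = w by simp [List.intercalate]]
              simp only [List.length_append, List.length_cons]
              omega)
        rw [this]
        rw [bPieces_cons, if_neg (by rw [pyGetD_neg_one w hwne]; exact hpunct)]
theorem aLoop_zero (t : List Char) (n : Int) (hn : n ≤ 0) :
    ∀ (l : List (Int × Char)) (start : Int), ((aLoop t n l [] start).1).length ≤ 1 := by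
  intro l
  induction l with
  | nil => intro start; simp [aLoop]
  | cons p rest ih =>
    intro start
    obtain ⟨i, ch⟩ := p
    rw [aLoop]
    split
    · rw [if_pos (le_trans hn (by positivity))]
      split <;> simp
    · exact ih start

theorem slice_small (l : List (List Char)) (n : Int) (hl : l.length ≤ 1) (hn : n ≤ 0) :
    PySem.List.slice l none (some n) = [] := by
  simp only [PySem.List.slice, PySem.List.clampIdx]
  split_ifs <;> simp <;> omega

theorem strip_join (l : List (List Char)) (h : ∀ p ∈ l, GoodP p) :
    PySem.Chars.strip (PySem.Chars.join [' '] l) = PySem.Chars.join [' '] l := by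
  cases l with
  | nil => rfl
  | cons p r => exact strip_goodP _ (inter_goodP _ (by simp) h)

theorem first_n_sentences_spec' (text : String) (n : Int) :
    first_n_sentences text n = first_n_sentences_alt text n := by
  simp only [first_n_sentences, first_n_sentences_alt]
  have hgw : ∀ u ∈ PySem.Chars.split₀ text.toList, GoodW u := split₀_goodW text.toList
  rw [show (if (bLoop (PySem.Chars.split₀ text.toList) [] []).2 ≠ [] then
        (bLoop (PySem.Chars.split₀ text.toList) [] []).1 ++
          [PySem.Chars.join [' '] (bLoop (PySem.Chars.split₀ text.toList) [] []).2]
      else (bLoop (PySem.Chars.split₀ text.toList) [] []).1) =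
      bPieces (PySem.Chars.split₀ text.toList) [] from rfl]
  by_cases hwse : PySem.Chars.split₀ text.toList = []
  · rw [hwse, bPieces_nil, if_pos (show PySem.Chars.join [' '] ([] : List (List Char)) = []
      from rfl), if_neg (show ¬(([] : List (List Char)) ≠ []) by simp)]
    rw [show PySem.List.slice ([] : List (List Char)) none (some (max n 0)) = [] by
      simp [PySem.List.slice]]
    rfl
  · have hgp : ∀ u ∈ PySem.Chars.split₀ text.toList, GoodP u :=
      fun u hu => goodW_goodP u (hgw u hu)
    have htne : PySem.Chars.join [' '] (PySem.Chars.split₀ text.toList) ≠ [] :=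
      (inter_goodP _ hwse hgp).1
    rw [if_neg htne]
    by_cases hn : n ≤ 0
    · have h1 := aLoop_zero (PySem.Chars.join [' '] (PySem.Chars.split₀ text.toList)) n hn
        (PySem.List.enumerate (PySem.Chars.join [' '] (PySem.Chars.split₀ text.toList)) 0) 0
      rw [aTail, if_neg (by omega)]
      rw [slice_small _ n h1 hn]
      rw [show max n 0 = 0 by omega, PySem.List.slice_to _ le_rfl]
      simp
      rfl
    · have hn1 : 1 ≤ n := by omega
      have key := main_inv (PySem.Chars.join [' '] (PySem.Chars.split₀ text.toList)) n hn1
        (PySem.Chars.split₀ text.toList) [] [] 0 0 hgw (by simp) (by simp) (by simpa using hn1)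
        (by rw [List.drop_zero]; rfl) (by rw [List.drop_zero]; rfl) (by intro; simp)
      rw [List.drop_zero, Nat.cast_zero, List.nil_append] at key
      rw [PySem.List.slice_to _ (by omega), key]
      rw [show max n 0 = n by omega, PySem.List.slice_to _ (by omega)]
      rw [strip_join _ (fun p hp => bPieces_goodP (PySem.Chars.split₀ text.toList) [] hgw
        (by simp) p (List.mem_of_mem_take hp))]

-- ===== VERDICT (by name: the statement is the Claim_ definition above) =====
theorem first_n_sentences_spec : Claim_equal_first_n_sentences := by
  intro text n _
  exact first_n_sentences_spec' text n
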